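-- pv_equiv track=rewrite | github.com/JoSihun/ThisIsCodingTest | NaverWebtoonCodingTest/solution1.py | solution
-- ===== SOURCE A (Python) =====
-- def solution(lottery):
--     checkDict1 = dict()
--     for userId, check in lottery:
--         if not userId in checkDict1 and check == 1:
--             checkDict1[userId] = 0
--     if len(checkDict1) == 0:
--         return 0
--
--     checkDict2 = dict()
--     for userId in checkDict1.keys():
--         if not userId in checkDict2:
--             checkDict2[userId] = False
--
--     for userId, check in lottery:
--         if userId in checkDict2:
--             if checkDict2[userId] == False:
--                 checkDict1[userId] += 1
--                 if check == 1:
--                     checkDict2[userId] = True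
--
--     sum = 0
--     for value in checkDict1.values():
--         sum += value
--     answer = sum // len(checkDict1)
--
--     return answer
-- ===== SOURCE B (Python) =====
-- def solution(lottery):
--     # Group each user's check stream, then use the closed form:
--     # entries-until-first-win = first index of 1 in the stream, plus one.
--     groups = {}
--     for userId, check in lottery:
--         groups.setdefault(userId, []).append(check)
--     counts = [cs.index(1) + 1 for cs in groups.values() if 1 in cs]
--     if not counts:
--         return 0
--     return sum(counts) // len(counts)
-- ===== Notes on version B (the rewrite author's own statement) =====
-- stated objective: simpler
-- what changed: Instead of A's flag-driven simulation (four scans with counter and done-flag dicts incremented entry by entry), B groups each user's check stream once and computes each count as a closed form: the first index of 1 in that stream plus one.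
import Mathlib
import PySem

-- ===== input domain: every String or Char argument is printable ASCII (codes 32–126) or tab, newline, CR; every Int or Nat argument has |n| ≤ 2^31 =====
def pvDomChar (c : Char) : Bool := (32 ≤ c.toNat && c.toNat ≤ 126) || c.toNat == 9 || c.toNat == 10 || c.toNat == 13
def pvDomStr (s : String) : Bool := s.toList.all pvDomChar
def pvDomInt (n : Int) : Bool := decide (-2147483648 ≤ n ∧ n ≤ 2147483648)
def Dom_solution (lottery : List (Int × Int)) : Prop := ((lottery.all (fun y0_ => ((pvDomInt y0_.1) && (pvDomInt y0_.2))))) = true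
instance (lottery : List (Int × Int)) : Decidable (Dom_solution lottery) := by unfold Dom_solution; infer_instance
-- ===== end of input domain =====

-- B groups each user's check stream once and gets each count as a closed form
-- (first index of 1, plus one) instead of A's flag-driven entry-by-entry simulation (objective: simpler).

-- ===== PORT A =====
-- first loop: collect users that have a winning (check == 1) entry, value 0
def stepA1 (d : PySem.Dict Int Int) (p : Int × Int) : PySem.Dict Int Int :=
  if d.contains p.1 = false ∧ p.2 = 1 then d.insert p.1 0 else d

-- second loop: userId -> False over checkDict1.keys()
def stepA2 (d : PySem.Dict Int Bool) (u : Int) : PySem.Dict Int Bool :=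
  if d.contains u = false then d.insert u false else d

-- third loop: state = (checkDict1, checkDict2).
-- `checkDict1[userId] += 1` is ported as `modify … 0 (· + 1)`: the key is always present here
-- (the guard requires membership in checkDict2, whose keys come from checkDict1), so this is exact.
def stepA3 (s : PySem.Dict Int Int × PySem.Dict Int Bool) (p : Int × Int) :
    PySem.Dict Int Int × PySem.Dict Int Bool :=
  if s.2.contains p.1 = true then
    if s.2.getD p.1 false = false then
      (s.1.modify p.1 0 (· + 1), if p.2 = 1 then s.2.insert p.1 true else s.2)
    else s
  else s

def solution (lottery : List (Int × Int)) : Int :=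
  let checkDict1 := lottery.foldl stepA1 PySem.Dict.empty
  if checkDict1.size = 0 then 0
  else
    let checkDict2 := checkDict1.keys.foldl stepA2 PySem.Dict.empty
    let st := lottery.foldl stepA3 (checkDict1, checkDict2)
    let sum := st.1.values.foldl (· + ·) 0
    PySem.Int.floordiv sum (st.1.size : Int)

-- ===== PORT B =====
-- grouping pass: `groups.setdefault(userId, []).append(check)` = modify with default [] and append
def stepB (d : PySem.Dict Int (List Int)) (p : Int × Int) : PySem.Dict Int (List Int) :=
  d.modify p.1 [] (· ++ [p.2])

def solution_alt (lottery : List (Int × Int)) : Int :=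
  let groups := lottery.foldl stepB PySem.Dict.empty
  -- `cs.index(1)` is guarded by `1 in cs`, so index? is some here; getD 0 is exact
  let counts := (groups.values.filter (fun cs => decide (1 ∈ cs))).map
    (fun cs => (((PySem.List.index? cs 1).getD 0 : Nat) : Int) + 1)
  if counts = [] then 0
  else PySem.Int.floordiv counts.sum (counts.length : Int)

-- ===== PRECONDITION & SPEC =====
def Spec_solution (lottery : List (Int × Int)) (out : Int) : Prop := out = solution_alt lottery
instance (lottery : List (Int × Int)) (out : Int) : Decidable (Spec_solution lottery out) := by unfold Spec_solution; infer_instance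

-- ===== CLAIM (what is proved, stated in full; the proofs are below) =====
def Claim_equal_solution : Prop := ∀ (lottery : List (Int × Int)), Dom_solution lottery → Spec_solution lottery (solution lottery)

-- ===== LEMMAS AND PROOFS =====

-- the stream of `check` values of user u, in order
def checksOf (u : Int) (l : List (Int × Int)) : List Int :=
  (l.filter (fun p => p.1 == u)).map (·.2)

-- number of entries of a user up to and including the first winning one (if any), else all of them
def upCount (es : List Int) : Int :=
  if 1 ∈ es then ((es.takeWhile (fun e => e != 1)).length : Int) + 1 else (es.length : Int)

theorem checksOf_cons (u : Int) (p : Int × Int) (l : List (Int × Int)) :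
    checksOf u (p :: l) = if p.1 = u then p.2 :: checksOf u l else checksOf u l := by
  simp only [checksOf, List.filter_cons]
  by_cases h : p.1 = u <;> simp [h]

theorem upCount_cons (c : Int) (es : List Int) :
    upCount (c :: es) = if c = 1 then 1 else upCount es + 1 := by
  unfold upCount
  by_cases hc : c = 1
  · simp [hc]
  · have hc' : ¬ (1 = c) := fun h => hc h.symm
    simp only [List.mem_cons, hc', false_or, List.takeWhile_cons]
    by_cases hm : 1 ∈ es <;> simp [hm, hc]

-- ---- pass 1 (A) ----
theorem foldA1_get? (l : List (Int × Int)) : ∀ (d : PySem.Dict Int Int) (u : Int),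
    (l.foldl stepA1 d).get? u =
      if (d.get? u).isSome then d.get? u
      else if 1 ∈ checksOf u l then some 0 else none := by
  induction l with
  | nil => intro d u; simp [checksOf]
  | cons p l ih =>
    intro d u
    simp only [List.foldl_cons]
    rw [ih, checksOf_cons]
    unfold stepA1
    rw [PySem.Dict.contains_eq_isSome_get?]
    by_cases hu : p.1 = u
    · subst hu
      by_cases hs : (d.get? p.1).isSome
      · by_cases h2 : p.2 = 1 <;> simp [h2, hs]
      · by_cases h2 : p.2 = 1
        · simp [h2, hs, PySem.Dict.get?_insert_self]
        · have h2' : ¬ (1 = p.2) := fun h => h2 h.symm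
          simp [h2, h2', hs]
    · have hne : u ≠ p.1 := fun h => hu h.symm
      by_cases h2 : p.2 = 1 <;>
        by_cases hs : (d.get? p.1).isSome <;>
          simp [h2, hs, PySem.Dict.get?_insert_of_ne _ _ hne, hu]

theorem foldA1_nodup (l : List (Int × Int)) : ∀ (d : PySem.Dict Int Int),
    d.keys.Nodup → (l.foldl stepA1 d).keys.Nodup := by
  induction l with
  | nil => intro d h; exact h
  | cons p l ih =>
    intro d h
    simp only [List.foldl_cons]
    apply ih
    unfold stepA1
    split
    · exact PySem.Dict.nodup_keys_insert _ _ _ h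
    · exact h

-- ---- pass 2 (A) ----
theorem foldA2_get? (K : List Int) : ∀ (d : PySem.Dict Int Bool) (u : Int),
    (K.foldl stepA2 d).get? u =
      if (d.get? u).isSome then d.get? u
      else if u ∈ K then some false else none := by
  induction K with
  | nil => intro d u; simp
  | cons k K ih =>
    intro d u
    simp only [List.foldl_cons]
    rw [ih]
    unfold stepA2
    rw [PySem.Dict.contains_eq_isSome_get?]
    by_cases hu : k = u
    · subst hu
      by_cases hs : (d.get? k).isSome
      · simp [hs]
      · simp [hs, PySem.Dict.get?_insert_self]
    · have hne : u ≠ k := fun h => hu h.symm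
      by_cases hs : (d.get? k).isSome <;>
        simp [hs, PySem.Dict.get?_insert_of_ne _ _ hne, hne]

-- ---- pass 3 (A) ----
theorem foldA3_getD (l : List (Int × Int)) :
    ∀ (s : PySem.Dict Int Int × PySem.Dict Int Bool) (u : Int),
    ((l.foldl stepA3 s).1).getD u 0 =
      if s.2.contains u = true ∧ s.2.getD u false = false
      then s.1.getD u 0 + upCount (checksOf u l)
      else s.1.getD u 0 := by
  induction l with
  | nil => intro s u; split_ifs <;> simp [checksOf, upCount]
  | cons p l ih =>
    intro s u
    simp only [List.foldl_cons]
    rw [ih, checksOf_cons]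
    unfold stepA3
    by_cases hc : s.2.contains p.1 = true
    · rw [if_pos hc]
      by_cases hdone : s.2.getD p.1 false = false
      · rw [if_pos hdone]
        by_cases hu : p.1 = u
        · subst hu
          by_cases h2 : p.2 = 1
          · simp [h2, hc, hdone, PySem.Dict.getD_insert_self, PySem.Dict.getD_modify_self,
                  upCount_cons]
          · simp [h2, hc, hdone, PySem.Dict.getD_modify_self, upCount_cons]
            ring
        · have hne : u ≠ p.1 := fun h => hu h.symm
          by_cases h2 : p.2 = 1
          · have hb : (u == p.1) = false := by simp [hne]
            simp [h2, hu, hb, PySem.Dict.contains_insert,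
              PySem.Dict.getD_insert_of_ne _ _ _ hne, PySem.Dict.getD_modify_of_ne _ _ _ hne]
          · simp [h2, hu, PySem.Dict.getD_modify_of_ne _ _ _ hne]
      · rw [if_neg hdone]
        by_cases hu : p.1 = u
        · subst hu; simp [hdone]
        · simp [hu]
    · rw [if_neg hc]
      by_cases hu : p.1 = u
      · subst hu; simp [hc]
      · simp [hu]

theorem foldA3_keys (l : List (Int × Int)) :
    ∀ (s : PySem.Dict Int Int × PySem.Dict Int Bool),
    (∀ k, s.2.contains k = true → s.1.contains k = true) →
    ((l.foldl stepA3 s).1).keys = s.1.keys ∧ ((l.foldl stepA3 s).2).keys = s.2.keys := by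
  induction l with
  | nil => intro s _; exact ⟨rfl, rfl⟩
  | cons p l ih =>
    intro s hsub
    simp only [List.foldl_cons]
    have hkeys : (stepA3 s p).1.keys = s.1.keys ∧ (stepA3 s p).2.keys = s.2.keys := by
      unfold stepA3
      by_cases hc : s.2.contains p.1 = true
      · by_cases hdone : s.2.getD p.1 false = false
        · simp only [hc, hdone, if_true]
          constructor
          · rw [PySem.Dict.keys_modify,
                PySem.Dict.keys_insert_of_contains _ _ (hsub p.1 hc)]
          · by_cases h2 : p.2 = 1
            · simp [h2, PySem.Dict.keys_insert_of_contains _ _ hc]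
            · simp [h2]
        · simp [hc, hdone]
      · simp [hc]
    have hsub' : ∀ k, (stepA3 s p).2.contains k = true → (stepA3 s p).1.contains k = true := by
      intro k hk
      rw [PySem.Dict.contains_iff_mem_keys] at hk ⊢
      rw [hkeys.1]; rw [hkeys.2] at hk
      exact (PySem.Dict.contains_iff_mem_keys _ _).mp (hsub k ((PySem.Dict.contains_iff_mem_keys _ _).mpr hk))
    rcases ih (stepA3 s p) hsub' with ⟨h1, h2⟩
    exact ⟨h1.trans hkeys.1, h2.trans hkeys.2⟩

-- ---- B's grouping pass ----
theorem foldB_getD (l : List (Int × Int)) (u : Int) :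
    (l.foldl stepB PySem.Dict.empty).getD u [] = checksOf u l := by
  unfold stepB checksOf
  rw [PySem.Dict.getD_foldl_modify_append]
  simp

theorem foldB_keys_mem (l : List (Int × Int)) (u : Int) :
    u ∈ (l.foldl stepB PySem.Dict.empty).keys ↔ checksOf u l ≠ [] := by
  unfold stepB
  rw [PySem.Dict.keys_foldl_modify_key l (·.1)]
  rw [PySem.Set.mem_update]
  simp only [PySem.Dict.keys, PySem.Dict.empty]
  constructor
  · intro h
    rcases h with h | h
    · simp at h
    · rcases List.mem_map.mp h with ⟨p, hp, hpu⟩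
      intro hnil
      have : p.2 ∈ checksOf u l := by
        unfold checksOf
        exact List.mem_map.mpr ⟨p, List.mem_filter.mpr ⟨hp, by simp [hpu]⟩, rfl⟩
      rw [hnil] at this; simp at this
  · intro h
    right
    rcases List.exists_mem_of_ne_nil _ h with ⟨c, hc⟩
    unfold checksOf at hc
    rcases List.mem_map.mp hc with ⟨p, hp, _⟩
    have hpmem := List.mem_filter.mp hp
    exact List.mem_map.mpr ⟨p, hpmem.1, by simpa using hpmem.2⟩

theorem foldB_nodup (l : List (Int × Int)) :
    (l.foldl stepB PySem.Dict.empty).keys.Nodup := by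
  unfold stepB
  exact PySem.Dict.nodup_keys_foldl_modify_key l (·.1) [] (fun _ p => (· ++ [p.2])) _ (by simp)

-- first index of 1, plus one, equals upCount when 1 occurs
theorem index?_upCount (es : List Int) (h : 1 ∈ es) :
    (((PySem.List.index? es 1).getD 0 : Nat) : Int) + 1 = upCount es := by
  induction es with
  | nil => simp at h
  | cons c es ih =>
    rw [upCount_cons]
    by_cases hc : c = 1
    · subst hc
      rw [PySem.List.index?_cons_self]
      simp
    · have hne : c ≠ 1 := hc
      have hmem : 1 ∈ es := by
        rcases List.mem_cons.mp h with h1 | h1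
        · exact absurd h1.symm hne
        · exact h1
      rw [if_neg hc, ← ih hmem]
      rcases hidx : PySem.List.index? es 1 with _ | k
      · rw [PySem.List.index?_eq_none_iff] at hidx
        exact absurd hmem hidx
      · rw [PySem.List.index?_eq_idxOf?] at hidx ⊢
        have hb : (c == 1) = false := by simp [hc]
        simp [List.idxOf?_cons, hb, hidx]

-- ===== VERDICT (by name: the statement is the Claim_ definition above) =====
theorem solution_spec : Claim_equal_solution := by
  intro l _
  unfold Spec_solution
  simp only [solution, solution_alt]
  set d1 := l.foldl stepA1 PySem.Dict.empty with hd1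
  set groups := l.foldl stepB PySem.Dict.empty with hgroups
  have hA1 : ∀ u, d1.get? u = if 1 ∈ checksOf u l then some 0 else none := by
    intro u; rw [hd1, foldA1_get?]; simp
  have hKmem : ∀ u, u ∈ d1.keys ↔ 1 ∈ checksOf u l := by
    intro u
    rw [← not_iff_not, ← PySem.Dict.get?_eq_none_iff_not_mem_keys, hA1]
    by_cases h : 1 ∈ checksOf u l <;> simp [h]
  have hnodup1 : d1.keys.Nodup := by
    rw [hd1]; exact foldA1_nodup l _ (by simp)
  set d2 := d1.keys.foldl stepA2 PySem.Dict.empty with hd2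
  have hA2 : ∀ u, d2.get? u = if u ∈ d1.keys then some false else none := by
    intro u; rw [hd2, foldA2_get?]; simp
  have hc2 : ∀ u, d2.contains u = true ↔ u ∈ d1.keys := by
    intro u; rw [PySem.Dict.contains_eq_isSome_get?, hA2]
    by_cases h : u ∈ d1.keys <;> simp [h]
  have hg2 : ∀ u, d2.getD u false = false := by
    intro u; rw [PySem.Dict.getD_eq_get?_getD, hA2]
    by_cases h : u ∈ d1.keys <;> simp [h]
  set st := l.foldl stepA3 (d1, d2) with hst
  have hsub : ∀ k, d2.contains k = true → d1.contains k = true := by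
    intro k hk
    rw [PySem.Dict.contains_iff_mem_keys]
    exact (hc2 k).mp hk
  have hkeys : st.1.keys = d1.keys := (foldA3_keys l (d1, d2) hsub).1
  have hstget : ∀ u ∈ d1.keys, st.1.getD u 0 = upCount (checksOf u l) := by
    intro u hu
    rw [hst, foldA3_getD]
    have h1 : 1 ∈ checksOf u l := (hKmem u).mp hu
    have hz : d1.getD u 0 = 0 := by
      rw [PySem.Dict.getD_eq_get?_getD, hA1]; simp [h1]
    simp [(hc2 u).mpr hu, hg2, hz]
  have hnodupB : groups.keys.Nodup := by rw [hgroups]; exact foldB_nodup l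
  have hvalB : groups.values = groups.keys.map (fun u => groups.getD u []) :=
    PySem.Dict.values_eq_map_keys groups hnodupB []
  have hgget : ∀ u, groups.getD u [] = checksOf u l := by
    intro u; rw [hgroups]; exact foldB_getD l u
  have hKB0 : ∀ u, u ∈ groups.keys ↔ checksOf u l ≠ [] := by
    intro u; rw [hgroups]; exact foldB_keys_mem l u
  set KB := groups.keys.filter (fun u => decide (1 ∈ checksOf u l)) with hKBdef
  have hcounts : (groups.values.filter (fun cs => decide (1 ∈ cs))).map
      (fun cs => (((PySem.List.index? cs 1).getD 0 : Nat) : Int) + 1)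
      = KB.map (fun u => upCount (checksOf u l)) := by
    rw [hvalB, List.filter_map, List.map_map, hKBdef]
    have hf : ∀ u ∈ groups.keys,
        ((fun cs : List Int => decide (1 ∈ cs)) ∘ fun u => groups.getD u []) u
          = decide (1 ∈ checksOf u l) := by
      intro u _; simp [Function.comp, hgget]
    rw [List.filter_congr hf]
    apply List.map_congr_left
    intro u hu
    have h1 : 1 ∈ checksOf u l := by
      have := (List.mem_filter.mp hu).2; simpa using this
    simp only [Function.comp, hgget]
    exact index?_upCount _ h1
  have hKBmem : ∀ u, u ∈ KB ↔ 1 ∈ checksOf u l := by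
    intro u
    rw [hKBdef, List.mem_filter]
    constructor
    · rintro ⟨_, h⟩; simpa using h
    · intro h
      refine ⟨(hKB0 u).mpr ?_, by simpa⟩
      intro hnil; rw [hnil] at h; simp at h
  have hperm : d1.keys.Perm KB := by
    rw [List.perm_ext_iff_of_nodup hnodup1 (hnodupB.filter _)]
    intro u; rw [hKmem, hKBmem]
  have hsz1 : d1.size = d1.keys.length := by
    simp [PySem.Dict.size, PySem.Dict.keys]
  by_cases h0 : d1.keys = []
  · have hz : d1.size = 0 := by rw [hsz1, h0]; rfl
    have hKBnil : KB = [] := by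
      have hp := hperm
      rw [h0] at hp
      exact (List.perm_nil.mp hp.symm)
    rw [if_pos hz, hcounts, hKBnil]; simp
  · have hlen : d1.keys.length = KB.length := hperm.length_eq
    have hsz : ¬ d1.size = 0 := by
      rw [hsz1]
      simpa using h0
    have hKBne : KB ≠ [] := by
      intro h
      rw [h] at hlen
      exact h0 (List.eq_nil_of_length_eq_zero hlen)
    have hcne : KB.map (fun u => upCount (checksOf u l)) ≠ [] := by simp [hKBne]
    rw [if_neg hsz, if_neg (by rw [hcounts]; exact hcne)]
    have hvalA : st.1.values = d1.keys.map (fun u => upCount (checksOf u l)) := by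
      rw [PySem.Dict.values_eq_map_keys st.1 (by rw [hkeys]; exact hnodup1) 0, hkeys]
      exact List.map_congr_left hstget
    rw [hcounts, hvalA]
    have hsum : (d1.keys.map (fun u => upCount (checksOf u l))).foldl (· + ·) 0
        = (KB.map (fun u => upCount (checksOf u l))).sum := by
      rw [← List.sum_eq_foldl]
      exact (hperm.map _).sum_eq
    have hszst : st.1.size = d1.keys.length := by
      have : st.1.size = st.1.keys.length := by simp [PySem.Dict.size, PySem.Dict.keys]
      rw [this, hkeys]
    rw [hsum, hszst, hlen, List.length_map]
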